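-- pv_equiv track=rewrite | github.com/PDegez/advent_of_code_2024 | d3.py | get_enabled_data
-- ===== SOURCE A (Python) =====
-- def get_enabled_data(raw_patterns:list):
--     clean =[]
--
--     index_first_op = 0
--     while True :
--         if raw_patterns[index_first_op] in ["do()", "don't()"]:
--             break
--         else:
--             clean.append(raw_patterns[index_first_op])
--             index_first_op += 1
--
--     raw_pat_sec = raw_patterns[index_first_op:]
--
--     for index_pat, pattern in enumerate(raw_pat_sec):
--         if pattern == "do()":
--             pattern_a_check = raw_pat_sec[index_pat+1:]
--             index_a_check = 0
--             while True :
--                 if index_a_check > (len(pattern_a_check)-1):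
--                     break
--                 if pattern_a_check[index_a_check] in ["do()", "don't()"]:
--                     break
--                 if pattern_a_check[index_a_check] not in ["do()", "don't()"]:
--                     clean.append(pattern_a_check[index_a_check])
--                     index_a_check += 1
--
--     return clean
-- ===== SOURCE B (Python) =====
-- def get_enabled_data(raw_patterns: list):
--     clean = []
--     enabled = True
--     for pattern in raw_patterns:
--         if pattern == "do()":
--             enabled = True
--         elif pattern == "don't()":
--             enabled = False
--         elif enabled:
--             clean.append(pattern)
--     return clean
-- ===== Notes on version B (the rewrite author's own statement) =====
-- stated objective: simpler
-- what changed: Replaces A's prefix while-loop plus outer-for-with-inner-forward-rescans (and slicing) by one linear pass maintaining a single enabled flag.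
import Mathlib
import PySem

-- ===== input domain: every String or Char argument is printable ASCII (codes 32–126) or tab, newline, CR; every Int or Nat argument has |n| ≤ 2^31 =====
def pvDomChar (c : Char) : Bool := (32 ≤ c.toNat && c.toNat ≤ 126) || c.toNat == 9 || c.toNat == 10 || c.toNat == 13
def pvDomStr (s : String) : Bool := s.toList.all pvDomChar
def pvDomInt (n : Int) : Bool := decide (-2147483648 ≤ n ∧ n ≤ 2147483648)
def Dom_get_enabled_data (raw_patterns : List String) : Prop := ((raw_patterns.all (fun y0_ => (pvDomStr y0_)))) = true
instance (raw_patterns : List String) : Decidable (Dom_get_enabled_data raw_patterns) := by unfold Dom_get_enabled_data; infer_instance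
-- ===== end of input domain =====

-- B replaces A's prefix scan plus per-do() forward rescans by one linear pass with an enabled flag (objective: simpler).


-- ===== PORT A =====
-- first while-loop: walks forward appending until the first "do()"/"don't()"; returns
-- (clean so far, raw_patterns[index_first_op:]).  On a list with no marker Python raises
-- IndexError at raw_patterns[index_first_op]; that case is excluded by Pre_ below (the
-- recursion then simply bottoms out on []).
def pvAFirst : List String → List String × List String
  | [] => ([], [])
  | p :: rest =>
    if p = "do()" ∨ p = "don't()" then ([], p :: rest)
    else
      let r := pvAFirst rest
      (p :: r.1, r.2)

-- inner while-loop: collects pattern_a_check[0..] until out of range or a marker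
def pvAInner : List String → List String
  | [] => []
  | p :: rest => if p = "do()" ∨ p = "don't()" then [] else p :: pvAInner rest

-- outer for-loop over enumerate(raw_pat_sec): at each "do()" the slice raw_pat_sec[index_pat+1:]
-- is exactly the tail after the current element, so the recursion passes that tail.
def pvAOuter : List String → List String
  | [] => []
  | p :: rest => (if p = "do()" then pvAInner rest else []) ++ pvAOuter rest

def get_enabled_data (raw_patterns : List String) : List String :=
  let fr := pvAFirst raw_patterns
  fr.1 ++ pvAOuter fr.2

-- ===== PORT B =====
-- loop body of Source B's single pass: state = (clean, enabled)
def pvBStep (st : List String × Bool) (p : String) : List String × Bool :=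
  if p = "do()" then (st.1, true)
  else if p = "don't()" then (st.1, false)
  else if st.2 then (st.1 ++ [p], st.2)
  else st

def get_enabled_data_alt (raw_patterns : List String) : List String :=
  (raw_patterns.foldl pvBStep ([], true)).1

-- ===== PRECONDITION & SPEC =====
-- Pre_ excludes exactly the inputs on which A raises IndexError: lists containing no marker.
def Pre_get_enabled_data (raw_patterns : List String) : Prop :=
  "do()" ∈ raw_patterns ∨ "don't()" ∈ raw_patterns
instance (raw_patterns : List String) : Decidable (Pre_get_enabled_data raw_patterns) := by
  unfold Pre_get_enabled_data; infer_instance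

def pvWitness_get_enabled_data : List String := ["mul(2,3)", "don't()", "x", "do()", "y"]

def Spec_get_enabled_data (raw_patterns : List String) (out : List String) : Prop := out = get_enabled_data_alt raw_patterns
instance (raw_patterns : List String) (out : List String) : Decidable (Spec_get_enabled_data raw_patterns out) := by unfold Spec_get_enabled_data; infer_instance

-- ===== CLAIM (what is proved, stated in full; the proofs are below) =====
def Claim_equal_get_enabled_data : Prop := ∀ (raw_patterns : List String), Dom_get_enabled_data raw_patterns → Pre_get_enabled_data raw_patterns → Spec_get_enabled_data raw_patterns (get_enabled_data raw_patterns)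

-- ===== LEMMAS AND PROOFS =====

-- B's fold, characterised by A's pieces, for both flag values at once.
theorem pvBFold_char (sec : List String) : ∀ acc : List String,
    (sec.foldl pvBStep (acc, false)).1 = acc ++ pvAOuter sec ∧
    (sec.foldl pvBStep (acc, true)).1 = acc ++ (pvAInner sec ++ pvAOuter sec) := by
  induction sec with
  | nil => intro acc; simp [pvAOuter, pvAInner]
  | cons p rest ih =>
    intro acc
    by_cases hdo : p = "do()"
    · simp [pvBStep, pvAOuter, pvAInner, hdo, ih]
    · by_cases hdont : p = "don't()"
      · simp [pvBStep, pvAOuter, pvAInner, hdont, ih]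
      · simp [pvBStep, pvAOuter, pvAInner, hdo, hdont, ih]

-- A's first loop vs the single-pass view: the prefix it collects is pvAInner,
-- and skipping the marker-free prefix does not change pvAOuter.
theorem pvAFirst_char (raw : List String) :
    pvAInner raw = (pvAFirst raw).1 ∧ pvAOuter raw = pvAOuter (pvAFirst raw).2 := by
  induction raw with
  | nil => simp [pvAInner, pvAFirst, pvAOuter]
  | cons p rest ih =>
    by_cases hm : p = "do()" ∨ p = "don't()"
    · simp [pvAInner, pvAFirst, pvAOuter, hm]
    · have hdo : ¬ p = "do()" := fun h => hm (Or.inl h)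
      have hdont : ¬ p = "don't()" := fun h => hm (Or.inr h)
      simp [pvAInner, pvAFirst, pvAOuter, hdo, hdont, ih]

-- ===== VERDICT (by name: the statement is the Claim_ definition above) =====
theorem get_enabled_data_spec : Claim_equal_get_enabled_data := by
  intro raw _ _
  unfold Spec_get_enabled_data get_enabled_data get_enabled_data_alt
  have hb := (pvBFold_char raw []).2
  have ha := pvAFirst_char raw
  simp only [List.nil_append] at hb
  simp [hb, ha.1, ha.2]
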